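-- pv_equiv track=rewrite | github.com/tjarross/AdventOfCode | 2023/11/j11_1.py | expand_empty_columns
-- ===== SOURCE A (Python) =====
-- def expand_empty_columns(lines):
--     new_lines = [""] * len(lines)
--     for x in range(len(lines[0])):
--         column = [lines[y][x] for y in range(len(lines))]
--         if column.count("#") == 0:
--             for y in range(len(lines)):
--                 new_lines[y] += column[y]
--         for y in range(len(lines)):
--             new_lines[y] += column[y]
--     return new_lines
-- ===== SOURCE B (Python) =====
-- def expand_empty_columns(lines):
--     width = len(lines[0])
--     empty = {x for x in range(width)
--              if all(line[x] != "#" for line in lines)}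
--     out = []
--     for line in lines:
--         chars = []
--         for x in range(width):
--             chars.append(line[x])
--             if x in empty:
--                 chars.append(line[x])
--         out.append("".join(chars))
--     return out
-- ===== Notes on version B (the rewrite author's own statement) =====
-- stated objective: simpler
-- what changed: Replaces A's column-major loop that interleaves conditional and unconditional string appends into all rows at once with a two-phase row-major construction: one pass computes the set of '#'-free column indices, then each output row is built independently in a single pass and joined.
-- outside the precondition, e.g. on expand_empty_columns([]): A raises IndexError, B raises IndexError; on expand_empty_columns(['ab', 'a']): A raises IndexError, B raises IndexError
import Mathlib
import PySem

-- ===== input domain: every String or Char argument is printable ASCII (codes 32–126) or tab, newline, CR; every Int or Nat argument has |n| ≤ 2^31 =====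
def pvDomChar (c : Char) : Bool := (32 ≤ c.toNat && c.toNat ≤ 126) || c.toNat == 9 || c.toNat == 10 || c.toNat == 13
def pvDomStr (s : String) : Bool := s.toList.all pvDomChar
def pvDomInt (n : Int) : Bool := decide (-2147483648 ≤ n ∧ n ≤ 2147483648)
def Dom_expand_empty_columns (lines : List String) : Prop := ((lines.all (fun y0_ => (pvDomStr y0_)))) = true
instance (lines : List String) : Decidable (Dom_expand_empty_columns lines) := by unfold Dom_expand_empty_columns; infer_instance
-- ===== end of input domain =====

-- B replaces A's column-major interleaved appends with a two-phase row-major construction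
-- (first compute the set of '#'-free columns, then build each output row in one pass); objective: simpler.
-- Row accumulators are kept as List Char (Python strings of chars) and packed with String.mk at the end.

-- ===== PORT A =====
-- one iteration of A's outer loop over column index x; acc is new_lines (rows as char lists)
def eecStepA (lines : List String) (acc : List (List Char)) (x : Int) : List (List Char) :=
  let column := (PySem.List.pyRange 0 (lines.length : Int) 1).map
      (fun y => (PySem.Str.pyGet? (PySem.List.pyGetD lines y "") x).getD ' ')
  let acc1 := if column.count '#' = 0
    then (acc.zip column).map (fun p => p.1 ++ [p.2]) else acc
  (acc1.zip column).map (fun p => p.1 ++ [p.2])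

def expand_empty_columns (lines : List String) : List String :=
  let width : Int := ((PySem.List.pyGetD lines 0 "").toList.length : Int)
  ((PySem.List.pyRange 0 width 1).foldl (eecStepA lines)
      (List.replicate lines.length ([] : List Char))).map String.mk

-- ===== PORT B =====
-- the set of column indices whose column contains no '#'
def eecEmpty (lines : List String) (width : Int) : PySem.Set Int :=
  PySem.Set.ofList ((PySem.List.pyRange 0 width 1).filter
    (fun x => lines.all (fun line => (PySem.Str.pyGet? line x).getD ' ' != '#')))

-- build one output row from one input line
def eecRow (empty : PySem.Set Int) (width : Int) (line : String) : List Char :=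
  (PySem.List.pyRange 0 width 1).foldl (fun chars x =>
    let c := (PySem.Str.pyGet? line x).getD ' '
    let chars := chars ++ [c]
    if PySem.Set.contains empty x then chars ++ [c] else chars) []

def expand_empty_columns_alt (lines : List String) : List String :=
  let width : Int := ((PySem.List.pyGetD lines 0 "").toList.length : Int)
  let empty := eecEmpty lines width
  lines.map (fun line => String.mk (eecRow empty width line))

-- ===== PRECONDITION & SPEC =====
-- Pre_ excludes exactly the inputs where the Python A raises IndexError: the empty list
-- (lines[0]) and ragged grids where some row is shorter than the first row (lines[y][x]).
def Pre_expand_empty_columns (lines : List String) : Prop :=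
  lines ≠ [] ∧ ∀ l ∈ lines, (lines.headD "").toList.length ≤ l.toList.length
instance (lines : List String) : Decidable (Pre_expand_empty_columns lines) := by
  unfold Pre_expand_empty_columns; infer_instance
def pvWitness_expand_empty_columns : List String := ["#.", ".."]

def Spec_expand_empty_columns (lines : List String) (out : List String) : Prop := out = expand_empty_columns_alt lines
instance (lines : List String) (out : List String) : Decidable (Spec_expand_empty_columns lines out) := by unfold Spec_expand_empty_columns; infer_instance

-- ===== CLAIM (what is proved, stated in full; the proofs are below) =====
def Claim_equal_expand_empty_columns : Prop := ∀ (lines : List String), Dom_expand_empty_columns lines → Pre_expand_empty_columns lines → Spec_expand_empty_columns lines (expand_empty_columns lines)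

-- ===== LEMMAS AND PROOFS =====

-- the character A reads for row `line`, column x (total form; in range under Pre_)
def eecChar (line : String) (x : Int) : Char := (PySem.Str.pyGet? line x).getD ' '

-- A's column, built by index, is just a map over the rows
lemma eec_column_eq (lines : List String) (x : Int) :
    (PySem.List.pyRange 0 (lines.length : Int) 1).map
        (fun y => (PySem.Str.pyGet? (PySem.List.pyGetD lines y "") x).getD ' ')
      = lines.map (fun line => eecChar line x) := by
  have h := PySem.List.map_pyGetD_pyRange_zero' lines ""
  calc (PySem.List.pyRange 0 (lines.length : Int) 1).map
        (fun y => (PySem.Str.pyGet? (PySem.List.pyGetD lines y "") x).getD ' ')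
      = ((PySem.List.pyRange 0 (lines.length : Int) 1).map
          (fun y => PySem.List.pyGetD lines y "")).map (fun line => eecChar line x) := by
        rw [List.map_map]; rfl
    _ = lines.map (fun line => eecChar line x) := by rw [h]

-- one A-step on a state of the shape `lines.map g` keeps that shape
lemma eec_stepA_map (lines : List String) (g : String → List Char) (x : Int) :
    eecStepA lines (lines.map g) x
      = lines.map (fun line =>
          let c := eecChar line x
          let chars := g line ++ [c]
          if (lines.map (fun l => eecChar l x)).count '#' = 0 then chars ++ [c] else chars) := by
  unfold eecStepA
  rw [eec_column_eq]
  by_cases h : (lines.map (fun l => eecChar l x)).count '#' = 0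
  · simp only [h, if_true, List.zip_map', List.map_map]
    apply List.map_congr_left; intro a _; simp
  · simp only [h, if_false, List.zip_map', List.map_map]
    apply List.map_congr_left; intro a _; simp

-- folding A's step over any column list, starting from a mapped state, is a per-row fold
lemma eec_foldA_map (lines : List String) (L : List Int) (g : String → List Char) :
    L.foldl (eecStepA lines) (lines.map g)
      = lines.map (fun line =>
          L.foldl (fun chars x =>
            let c := eecChar line x
            let chars := chars ++ [c]
            if (lines.map (fun l => eecChar l x)).count '#' = 0 then chars ++ [c] else chars)
            (g line)) := by
  induction L generalizing g with
  | nil => simp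
  | cons x L ih =>
    simp only [List.foldl_cons]
    rw [eec_stepA_map, ih]

-- the two guards agree on every x the loops visit
lemma eec_cond_eq (lines : List String) (width : Int) (x : Int)
    (hx : x ∈ PySem.List.pyRange 0 width 1) :
    (PySem.Set.contains (eecEmpty lines width) x = true)
      ↔ (lines.map (fun l => eecChar l x)).count '#' = 0 := by
  have hc : PySem.Set.contains (eecEmpty lines width) x = true ↔ x ∈ eecEmpty lines width := by
    simp [PySem.Set.contains]
  rw [hc]; unfold eecEmpty
  rw [PySem.Set.mem_ofList, List.mem_filter]
  simp only [hx, true_and, List.all_eq_true, List.count_eq_zero, List.mem_map, bne_iff_ne,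
    not_exists, not_and, eecChar]

-- ===== VERDICT (by name: the statement is the Claim_ definition above) =====
theorem expand_empty_columns_spec : Claim_equal_expand_empty_columns := by
  intro lines _ _
  unfold Spec_expand_empty_columns
  simp only [expand_empty_columns, expand_empty_columns_alt]
  rw [show List.replicate lines.length ([] : List Char) = lines.map (fun _ => ([] : List Char))
        from by simp]
  rw [eec_foldA_map, List.map_map]
  apply List.map_congr_left
  intro line _
  simp only [Function.comp]
  congr 1
  unfold eecRow
  apply PySem.List.foldl_congr_mem
  intro chars x hx
  dsimp only
  by_cases h : (lines.map (fun l => eecChar l x)).count '#' = 0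
  · rw [if_pos h, if_pos ((eec_cond_eq lines _ x hx).mpr h)]; rfl
  · rw [if_neg h, if_neg (fun hc => h ((eec_cond_eq lines _ x hx).mp hc))]; rfl
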